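-- pv_equiv track=rewrite | github.com/naydichev/advent-of-code-solutions | 2019/22/puzzle_1.py | deal_with_increment
-- ===== SOURCE A (Python) =====
-- def deal_with_increment(cards, inc):
--     card_len = len(cards)
--     new_deck = {0: cards.pop(0)}
--     i = 0
--
--     while len(cards):
--         i = (i + inc) % card_len
--         new_deck[i] = cards.pop(0)
--
--     return [new_deck[v] for v in sorted(new_deck.keys())]
-- ===== SOURCE B (Python) =====
-- def deal_with_increment(cards, inc):
--     # One pass: card k lands at index (k*inc) % n; build the position map directly,
--     # then read it off in index order. (A empties `cards` in place; B does not —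
--     # the equivalence is about the return value.)
--     n = len(cards)
--     new_deck = {(k * inc) % n: c for k, c in enumerate(cards)}
--     return [new_deck[p] for p in sorted(new_deck)]
-- ===== Notes on version B (the rewrite author's own statement) =====
-- stated objective: faster
-- what changed: Replaces the destructive while-loop (repeated cards.pop(0), each O(n), with a running index accumulator) by a single pass that computes each card's position with the closed form (k*inc) % n via enumerate; no mutation, no running state.
import Mathlib
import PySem

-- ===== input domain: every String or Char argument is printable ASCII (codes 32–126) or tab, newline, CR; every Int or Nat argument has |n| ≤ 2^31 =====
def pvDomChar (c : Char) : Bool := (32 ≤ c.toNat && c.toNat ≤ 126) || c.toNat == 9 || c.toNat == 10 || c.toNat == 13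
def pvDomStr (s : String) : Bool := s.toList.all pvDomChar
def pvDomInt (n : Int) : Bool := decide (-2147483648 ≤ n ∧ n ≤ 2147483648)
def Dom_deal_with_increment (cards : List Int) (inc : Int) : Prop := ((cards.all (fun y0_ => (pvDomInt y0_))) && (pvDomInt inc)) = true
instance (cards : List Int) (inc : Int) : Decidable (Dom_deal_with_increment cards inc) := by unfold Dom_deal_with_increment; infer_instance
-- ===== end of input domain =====

-- B replaces A's destructive pop(0) loop with a closed-form one-pass position map ((k*inc) % n) — faster;
-- A empties its `cards` argument in place, B does not: the equivalence proved here is about the return value.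

-- ===== PORT A =====
-- the while-loop: state is (remaining cards, current index i, dict new_deck)
def pvALoop (inc n : Int) : List Int → Int → PySem.Dict Int Int → PySem.Dict Int Int
  | [], _, d => d
  | c :: rest, i, d =>
      pvALoop inc n rest (PySem.Int.mod (i + inc) n) ((d.insert (PySem.Int.mod (i + inc) n) c))

def deal_with_increment (cards : List Int) (inc : Int) : List Int :=
  match cards with
  | [] => []  -- Python: cards.pop(0) raises IndexError here; excluded by Pre_
  | c :: rest =>
      let d := pvALoop inc ((c :: rest).length : Int) rest 0 (PySem.Dict.empty.insert 0 c)
      (PySem.List.sorted d.keys (fun x => x) false).map (fun v => (d.get? v).getD 0)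

-- ===== PORT B =====
def deal_with_increment_alt (cards : List Int) (inc : Int) : List Int :=
  let n : Int := cards.length
  let d := (PySem.List.enumerate cards 0).foldl
      (fun d kc => d.insert (PySem.Int.mod (kc.1 * inc) n) kc.2) PySem.Dict.empty
  (PySem.List.sorted d.keys (fun x => x) false).map (fun v => (d.get? v).getD 0)

-- ===== PRECONDITION & SPEC =====
-- A raises IndexError on the empty list (cards.pop(0)); everything else is admitted.
def Pre_deal_with_increment (cards : List Int) (inc : Int) : Prop := cards ≠ []
instance (cards : List Int) (inc : Int) : Decidable (Pre_deal_with_increment cards inc) := by unfold Pre_deal_with_increment; infer_instance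

def pvWitness_deal_with_increment : List Int × Int := ([3, 1, 2], 2)

def Spec_deal_with_increment (cards : List Int) (inc : Int) (out : List Int) : Prop := out = deal_with_increment_alt cards inc
instance (cards : List Int) (inc : Int) (out : List Int) : Decidable (Spec_deal_with_increment cards inc out) := by unfold Spec_deal_with_increment; infer_instance

-- ===== CLAIM (what is proved, stated in full; the proofs are below) =====
def Claim_equal_deal_with_increment : Prop := ∀ (cards : List Int) (inc : Int), Dom_deal_with_increment cards inc → Pre_deal_with_increment cards inc → Spec_deal_with_increment cards inc (deal_with_increment cards inc)

-- ===== LEMMAS AND PROOFS =====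

-- Python mod arithmetic used by the loop invariant: ((a % n) + b) % n = (a + b) % n for n > 0.
lemma pvMod_add (a b n : Int) (hn : 0 < n) :
    PySem.Int.mod (PySem.Int.mod a n + b) n = PySem.Int.mod (a + b) n := by
  rw [PySem.Int.mod_eq_emod_of_pos (a := a) hn, PySem.Int.mod_eq_emod_of_pos hn,
      PySem.Int.mod_eq_emod_of_pos hn]
  exact Int.emod_add_emod a n b

-- A's running index is the closed form: after j cumulative steps, i = (j*inc) % n,
-- so the remainder of A's loop inserts exactly what B's fold over enumerate inserts.
lemma pvALoop_eq_fold (inc n : Int) (hn : 0 < n) :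
    ∀ (rest : List Int) (j : Int) (d : PySem.Dict Int Int),
      pvALoop inc n rest (PySem.Int.mod (j * inc) n) d
        = (PySem.List.enumerate rest (j + 1)).foldl
            (fun d kc => d.insert (PySem.Int.mod (kc.1 * inc) n) kc.2) d := by
  intro rest
  induction rest with
  | nil => intro j d; simp [pvALoop, PySem.List.enumerate_nil]
  | cons c rest ih =>
      intro j d
      rw [PySem.List.enumerate_cons, List.foldl_cons]
      show pvALoop inc n rest (PySem.Int.mod (PySem.Int.mod (j * inc) n + inc) n)
          (d.insert (PySem.Int.mod (PySem.Int.mod (j * inc) n + inc) n) c) = _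
      rw [pvMod_add _ _ _ hn]
      have h1 : j * inc + inc = (j + 1) * inc := by ring
      rw [h1]
      exact ih (j + 1) _

-- ===== VERDICT (by name: the statement is the Claim_ definition above) =====
theorem deal_with_increment_spec : Claim_equal_deal_with_increment := by
  intro cards inc _hdom hpre
  unfold Spec_deal_with_increment
  match cards with
  | [] => exact absurd rfl hpre
  | c :: rest =>
      unfold deal_with_increment deal_with_increment_alt
      have hn : (0 : Int) < ((c :: rest).length : Int) := by simp
      have h0 : PySem.Int.mod ((0 : Int) * inc) ((c :: rest).length : Int) = 0 := by
        rw [zero_mul, PySem.Int.mod_eq_emod_of_pos hn]; simp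
      have key : pvALoop inc ((c :: rest).length : Int) rest 0 (PySem.Dict.empty.insert 0 c)
          = (PySem.List.enumerate (c :: rest) 0).foldl
              (fun d kc => d.insert (PySem.Int.mod (kc.1 * inc) ((c :: rest).length : Int)) kc.2)
              PySem.Dict.empty := by
        have hmain := pvALoop_eq_fold inc ((c :: rest).length : Int) hn rest 0
          (PySem.Dict.empty.insert (PySem.Int.mod ((0 : Int) * inc) ((c :: rest).length : Int)) c)
        rw [h0, zero_add] at hmain
        simp only [PySem.List.enumerate_cons, List.foldl_cons, h0, zero_add]
        exact hmain
      simp only [key]
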